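-- pv_equiv track=rewrite | github.com/DayanAguilar/practica-1 | utils.py | move_west
-- ===== SOURCE A (Python) =====
-- def move_west(new_board, row_copy, col_copy, previous_position, player):
--     for n in range(1, col_copy + 1):
--         if col_copy - n >= 0:
--             if new_board[row_copy][col_copy - n] is not None:
--                 break
--             new_board[row_copy][col_copy - n] = player
--             new_board[previous_position[0]][previous_position[1]] = None
--             previous_position = [row_copy, col_copy - n]
--     return new_board
-- ===== SOURCE B (Python) =====
-- def move_west(new_board, row_copy, col_copy, previous_position, player):
--     # Find-destination-then-single-write decomposition; mutates new_board in
--     # place like the original (return-value equivalence is what is proved).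
--     if col_copy < 1 or new_board[row_copy][col_copy - 1] is not None:
--         return new_board
--     new_board[previous_position[0]][previous_position[1]] = None
--     dest = col_copy - 1
--     while dest > 0 and new_board[row_copy][dest - 1] is None:
--         dest -= 1
--     new_board[row_copy][dest] = player
--     return new_board
-- ===== Notes on version B (the rewrite author's own statement) =====
-- stated objective: simpler
-- what changed: A threads per-step write-then-clear mutations (writing and re-clearing the player on every intermediate square) through the loop; B clears the vacated square once, scans west for the first blocked square to find the destination, and performs a single final write.
-- intended difference: When the player moves exactly one square west and previous_position already names that destination square, A writes the player there and then clears the same square, returning a board from which the player has vanished; B leaves the player on the destination square, which is the intended move. — e.g. on move_west([[none]], 0, 1, [0, 0], "P"): A returns [[none]], B returns [[some "P"]]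
import Mathlib
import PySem

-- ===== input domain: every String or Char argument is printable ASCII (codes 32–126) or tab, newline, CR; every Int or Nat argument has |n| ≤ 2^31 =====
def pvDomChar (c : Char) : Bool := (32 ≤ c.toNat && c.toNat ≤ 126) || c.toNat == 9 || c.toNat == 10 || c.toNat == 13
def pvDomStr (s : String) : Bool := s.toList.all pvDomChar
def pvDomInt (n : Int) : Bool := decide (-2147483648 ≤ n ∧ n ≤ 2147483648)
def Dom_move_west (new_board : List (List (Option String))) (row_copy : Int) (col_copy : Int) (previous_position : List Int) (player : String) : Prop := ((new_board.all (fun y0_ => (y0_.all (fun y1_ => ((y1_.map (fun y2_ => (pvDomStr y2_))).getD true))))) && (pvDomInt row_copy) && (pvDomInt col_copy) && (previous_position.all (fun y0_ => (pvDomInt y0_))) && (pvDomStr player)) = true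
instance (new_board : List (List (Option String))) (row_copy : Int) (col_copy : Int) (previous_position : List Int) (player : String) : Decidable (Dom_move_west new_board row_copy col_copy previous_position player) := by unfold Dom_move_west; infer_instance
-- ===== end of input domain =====

-- B replaces A's per-step write-and-clear threading by clear-the-vacated-square-once,
-- scan-for-the-destination, single final write (simpler; return-value equivalence —
-- both Pythons mutate new_board in place).

-- ===== PORT A =====
-- the for-loop of A with its `break`, as structural recursion over the range list
def mwLoopA (row_copy col_copy : Int) (player : String) :
    List Int → List (List (Option String)) → List Int → List (List (Option String))
  | [], board, _ => board
  | n :: ns, board, prev =>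
    if 0 ≤ col_copy - n then
      if PySem.List.pyGetD (PySem.List.pyGetD board row_copy []) (col_copy - n) none ≠ none then
        board
      else
        mwLoopA row_copy col_copy player ns
          (PySem.List.pySetD
            (PySem.List.pySetD board row_copy
              (PySem.List.pySetD (PySem.List.pyGetD board row_copy []) (col_copy - n) (some player)))
            (PySem.List.pyGetD prev 0 0)
            (PySem.List.pySetD
              (PySem.List.pyGetD
                (PySem.List.pySetD board row_copy
                  (PySem.List.pySetD (PySem.List.pyGetD board row_copy []) (col_copy - n) (some player)))
                (PySem.List.pyGetD prev 0 0) [])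
              (PySem.List.pyGetD prev 1 0) none))
          [row_copy, col_copy - n]
    else mwLoopA row_copy col_copy player ns board prev

def move_west (new_board : List (List (Option String))) (row_copy : Int) (col_copy : Int) (previous_position : List Int) (player : String) : List (List (Option String)) :=
  mwLoopA row_copy col_copy player (PySem.List.pyRange 1 (col_copy + 1) 1) new_board previous_position

-- ===== PORT B =====
-- Source B's while-loop `while dest > 0 and new_board[row_copy][dest - 1] is None: dest -= 1`
-- (dest is a nonnegative int, so it recurses on dest : Nat)
def mwScan (board : List (List (Option String))) (row_copy : Int) : Nat → Nat
  | 0 => 0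
  | d + 1 =>
    if PySem.List.pyGetD (PySem.List.pyGetD board row_copy []) ((d : Nat) : Int) none = none then
      mwScan board row_copy d
    else d + 1

def move_west_alt (new_board : List (List (Option String))) (row_copy : Int) (col_copy : Int) (previous_position : List Int) (player : String) : List (List (Option String)) :=
  if col_copy < 1 ∨ PySem.List.pyGetD (PySem.List.pyGetD new_board row_copy []) (col_copy - 1) none ≠ none then
    new_board
  else
    let p0 := PySem.List.pyGetD previous_position 0 0
    let p1 := PySem.List.pyGetD previous_position 1 0
    let b1 := PySem.List.pySetD new_board p0 (PySem.List.pySetD (PySem.List.pyGetD new_board p0 []) p1 none)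
    let dest := mwScan b1 row_copy (col_copy - 1).toNat
    PySem.List.pySetD b1 row_copy (PySem.List.pySetD (PySem.List.pyGetD b1 row_copy []) ((dest : Nat) : Int) (some player))

-- ===== PRECONDITION & SPEC =====
-- Pre_ excludes exactly the inputs on which the Python A raises IndexError:
-- a row/column/previous_position index out of range (Python wraparound included)
-- or previous_position shorter than 2 when a westward step happens.
def Pre_move_west (new_board : List (List (Option String))) (row_copy : Int) (col_copy : Int) (previous_position : List Int) (player : String) : Prop :=
  1 ≤ col_copy →
    (PySem.Raise.InRange new_board.length row_copy ∧
     col_copy ≤ ((PySem.List.pyGetD new_board row_copy []).length : Int) ∧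
     (PySem.List.pyGetD (PySem.List.pyGetD new_board row_copy []) (col_copy - 1) none = none →
        2 ≤ previous_position.length ∧
        PySem.Raise.InRange new_board.length (PySem.List.pyGetD previous_position 0 0) ∧
        PySem.Raise.InRange (PySem.List.pyGetD new_board (PySem.List.pyGetD previous_position 0 0) []).length (PySem.List.pyGetD previous_position 1 0)))

instance (new_board : List (List (Option String))) (row_copy : Int) (col_copy : Int) (previous_position : List Int) (player : String) : Decidable (Pre_move_west new_board row_copy col_copy previous_position player) := by unfold Pre_move_west; infer_instance

def pvWitness_move_west : List (List (Option String)) × Int × Int × List Int × String :=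
  ([[none, some "P"]], 0, 1, [0, 1], "P")

-- When the player makes exactly one step west and previous_position already names that
-- destination square, A writes the player there and then clears the same square, returning
-- a board from which the player has vanished; B leaves the player on the destination
-- square, which is the intended move.
def D_move_west (new_board : List (List (Option String))) (row_copy : Int) (col_copy : Int) (previous_position : List Int) (player : String) : Prop :=
  let row := PySem.List.pyGetD new_board row_copy []
  1 ≤ col_copy ∧
  PySem.List.pyIdx? new_board.length (PySem.List.pyGetD previous_position 0 0) = PySem.List.pyIdx? new_board.length row_copy ∧
  PySem.List.pyIdx? row.length (PySem.List.pyGetD previous_position 1 0) = some (col_copy - 1).toNat ∧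
  row.getD (col_copy - 1).toNat none = none ∧
  (col_copy = 1 ∨ row.getD (col_copy - 2).toNat none ≠ none)

instance (new_board : List (List (Option String))) (row_copy : Int) (col_copy : Int) (previous_position : List Int) (player : String) : Decidable (D_move_west new_board row_copy col_copy previous_position player) := by unfold D_move_west; infer_instance

def Spec_move_west (new_board : List (List (Option String))) (row_copy : Int) (col_copy : Int) (previous_position : List Int) (player : String) (out : List (List (Option String))) : Prop := ¬ D_move_west new_board row_copy col_copy previous_position player → out = move_west_alt new_board row_copy col_copy previous_position player
instance (new_board : List (List (Option String))) (row_copy : Int) (col_copy : Int) (previous_position : List Int) (player : String) (out : List (List (Option String))) : Decidable (Spec_move_west new_board row_copy col_copy previous_position player out) := by unfold Spec_move_west; infer_instance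

def pvDiffWitness_move_west : List (List (Option String)) × Int × Int × List Int × String :=
  ([[none]], 0, 1, [0, 0], "P")

def pvDiffWitnessOut_move_west : (List (List (Option String))) × (List (List (Option String))) :=
  ([[none]], [[some "P"]])

-- ===== CLAIM (what is proved, stated in full; the proofs are below) =====
def Claim_unchanged_move_west : Prop := ∀ (new_board : List (List (Option String))) (row_copy : Int) (col_copy : Int) (previous_position : List Int) (player : String), Dom_move_west new_board row_copy col_copy previous_position player → Pre_move_west new_board row_copy col_copy previous_position player → Spec_move_west new_board row_copy col_copy previous_position player (move_west new_board row_copy col_copy previous_position player)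
def Claim_changed_move_west : Prop := Dom_move_west (pvDiffWitness_move_west.1) (pvDiffWitness_move_west.2.1) (pvDiffWitness_move_west.2.2.1) (pvDiffWitness_move_west.2.2.2.1) (pvDiffWitness_move_west.2.2.2.2) ∧ Pre_move_west (pvDiffWitness_move_west.1) (pvDiffWitness_move_west.2.1) (pvDiffWitness_move_west.2.2.1) (pvDiffWitness_move_west.2.2.2.1) (pvDiffWitness_move_west.2.2.2.2) ∧ D_move_west (pvDiffWitness_move_west.1) (pvDiffWitness_move_west.2.1) (pvDiffWitness_move_west.2.2.1) (pvDiffWitness_move_west.2.2.2.1) (pvDiffWitness_move_west.2.2.2.2) ∧ move_west (pvDiffWitness_move_west.1) (pvDiffWitness_move_west.2.1) (pvDiffWitness_move_west.2.2.1) (pvDiffWitness_move_west.2.2.2.1) (pvDiffWitness_move_west.2.2.2.2) = pvDiffWitnessOut_move_west.1 ∧ move_west_alt (pvDiffWitness_move_west.1) (pvDiffWitness_move_west.2.1) (pvDiffWitness_move_west.2.2.1) (pvDiffWitness_move_west.2.2.2.1) (pvDiffWitness_move_west.2.2.2.2) = pvDiffWitnessOut_move_west.2 ∧ pvDiffWitnessOut_move_west.1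 ≠ pvDiffWitnessOut_move_west.2
def Claim_exact_move_west : Prop := ∀ (new_board : List (List (Option String))) (row_copy : Int) (col_copy : Int) (previous_position : List Int) (player : String), Dom_move_west new_board row_copy col_copy previous_position player → Pre_move_west new_board row_copy col_copy previous_position player → D_move_west new_board row_copy col_copy previous_position player → move_west new_board row_copy col_copy previous_position player ≠ move_west_alt new_board row_copy col_copy previous_position player

-- ===== LEMMAS AND PROOFS =====

-- Python's index normalisation (for an in-range, possibly negative index)
def pvNorm (len : Nat) (i : Int) : Int := if i < 0 then i + len else i

theorem pyIdx_norm {n : Nat} {i : Int} (h : PySem.Raise.InRange n i) :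
    PySem.List.pyIdx? n i = some (pvNorm n i).toNat := by
  obtain ⟨h1, h2⟩ := h
  unfold PySem.List.pyIdx? pvNorm
  by_cases hi : 0 ≤ i
  · rw [if_pos hi, if_pos h2, if_neg (by omega)]
  · rw [if_neg hi, if_pos (by omega), if_pos (by omega)]
    congr 1
    omega

theorem pvNorm_lt {n : Nat} {i : Int} (h : PySem.Raise.InRange n i) : (pvNorm n i).toNat < n := by
  obtain ⟨h1, h2⟩ := h
  unfold pvNorm
  split <;> omega

theorem pyGetD_norm {α : Type} (xs : List α) (i : Int) (d : α) (h : PySem.Raise.InRange xs.length i) :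
    PySem.List.pyGetD xs i d = xs.getD (pvNorm xs.length i).toNat d := by
  obtain ⟨h1, h2⟩ := h
  by_cases hi : 0 ≤ i
  · rw [PySem.List.pyGetD_eq_getElem xs d hi h2]
    rw [List.getD_eq_getElem]
    · congr 1
      unfold pvNorm
      rw [if_neg (by omega)]
    · unfold pvNorm
      rw [if_neg (by omega)]
      omega
  · push_neg at hi
    have hk1 : 0 < (-i).toNat := by omega
    have hk2 : (-i).toNat ≤ xs.length := by omega
    have hres := PySem.List.pyGet?_neg_natCast xs (-i).toNat hk1 hk2
    rw [show -((((-i).toNat : Nat)) : Int) = i from by omega] at hres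
    unfold PySem.List.pyGetD
    rw [hres]
    have hlt : xs.length - (-i).toNat < xs.length := by omega
    have he : (pvNorm xs.length i).toNat = xs.length - (-i).toNat := by
      unfold pvNorm
      rw [if_pos (by omega)]
      omega
    rw [he, List.getElem?_eq_getElem hlt, List.getD_eq_getElem _ _ hlt]
    rfl

theorem pySetD_norm {α : Type} (xs : List α) (i : Int) (v : α) (h : PySem.Raise.InRange xs.length i) :
    PySem.List.pySetD xs i v = xs.set (pvNorm xs.length i).toNat v := by
  obtain ⟨h1, h2⟩ := h
  by_cases hi : 0 ≤ i
  · rw [PySem.List.pySetD_of_nonneg xs v hi]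
    congr 1
    unfold pvNorm
    rw [if_neg (by omega)]
  · push_neg at hi
    unfold PySem.List.pySetD PySem.List.pySet? PySem.List.pyIdx?
    rw [if_neg (by omega), if_pos (by omega)]
    simp only [Option.map_some, Option.getD_some]
    congr 1
    unfold pvNorm
    rw [if_pos (by omega)]
    omega

theorem pyGetD_t {α : Type} (xs : List α) (i : Int) (t : Nat) (d : α)
    (h : PySem.Raise.InRange xs.length i) (ht : (pvNorm xs.length i).toNat = t) :
    PySem.List.pyGetD xs i d = xs.getD t d := by
  rw [pyGetD_norm _ _ _ h, ht]

theorem pySetD_t {α : Type} (xs : List α) (i : Int) (t : Nat) (v : α)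
    (h : PySem.Raise.InRange xs.length i) (ht : (pvNorm xs.length i).toNat = t) :
    PySem.List.pySetD xs i v = xs.set t v := by
  rw [pySetD_norm _ _ _ h, ht]

theorem pyGetD_one_cons {α : Type} (x y : α) (xs : List α) (d : α) :
    PySem.List.pyGetD (x :: y :: xs) 1 d = y := by
  unfold PySem.List.pyGetD PySem.List.pyGet? PySem.List.pyIdx?
  norm_num

theorem getD_set_eq {α : Type} (xs : List α) (i : Nat) (v d : α) (h : i < xs.length) :
    (xs.set i v).getD i d = v := by
  rw [List.getD_eq_getElem?_getD, List.getElem?_set, if_pos rfl, if_pos h]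
  rfl

theorem getD_set_ne {α : Type} (xs : List α) (i j : Nat) (v d : α) (h : i ≠ j) :
    (xs.set i v).getD j d = xs.getD j d := by
  rw [List.getD_eq_getElem?_getD, List.getElem?_set, if_neg h, ← List.getD_eq_getElem?_getD]

theorem set_eq_self_of_getD {α : Type} (xs : List α) (i : Nat) (d v : α) (hi : i < xs.length)
    (hv : xs.getD i d = v) : xs.set i v = xs := by
  apply List.ext_getElem?
  intro n
  rw [List.getElem?_set]
  by_cases hn : i = n
  · subst hn
    rw [if_pos rfl, if_pos hi, List.getElem?_eq_getElem hi]
    rw [List.getD_eq_getElem _ _ hi] at hv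
    rw [hv]
  · rw [if_neg hn]

-- proof-level view of B's scan, over plain List.getD
def scanN (row : List (Option String)) : Nat → Nat
  | 0 => 0
  | d + 1 => if row.getD d none = none then scanN row d else d + 1

theorem mwScan_eq (board : List (List (Option String))) (row_copy : Int) (t : Nat)
    (h : PySem.Raise.InRange board.length row_copy)
    (ht : (pvNorm board.length row_copy).toNat = t) :
    ∀ k, mwScan board row_copy k = scanN (board.getD t []) k := by
  intro k
  induction k with
  | zero => rfl
  | succ d ih =>
    unfold mwScan scanN
    rw [pyGetD_t board row_copy t [] h ht, PySem.List.pyGetD_natCast]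
    split
    · exact ih
    · rfl

-- one full non-breaking iteration of A's loop in its steady state
theorem loopA_step (row_copy col_copy : Int) (player : String)
    (base : List (List (Option String))) (t : Nat) (row : List (Option String))
    (hInR : PySem.Raise.InRange base.length row_copy)
    (ht : (pvNorm base.length row_copy).toNat = t)
    (c : Nat) (hc : (c : Int) + 1 ≤ col_copy) (hlen : c + 1 < row.length)
    (hcell : row.getD (c + 1) none = none) :
    mwLoopA row_copy col_copy player (PySem.List.pyRange (col_copy - (c : Int)) (col_copy + 1) 1)
      (base.set t (row.set (c + 1) (some player))) [row_copy, (c : Int) + 1]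
    = (if row.getD c none = none
       then mwLoopA row_copy col_copy player
              (PySem.List.pyRange (col_copy - (c : Int) + 1) (col_copy + 1) 1)
              (base.set t (row.set c (some player))) [row_copy, (c : Int)]
       else base.set t (row.set (c + 1) (some player))) := by
  have htlt : t < base.length := by
    have := pvNorm_lt hInR
    omega
  have hInR1 : PySem.Raise.InRange (base.set t (row.set (c + 1) (some player))).length row_copy := by
    simpa using hInR
  have ht1 : (pvNorm (base.set t (row.set (c + 1) (some player))).length row_copy).toNat = t := by
    simpa using ht
  rw [PySem.List.pyRange_one_cons (by omega : col_copy - (c : Int) < col_copy + 1)]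
  simp only [mwLoopA]
  have e1 : col_copy - (col_copy - (c : Int)) = ((c : Nat) : Int) := by push_cast; ring
  rw [e1]
  rw [if_pos (by omega : (0:Int) ≤ ((c : Nat) : Int))]
  rw [pyGetD_t _ row_copy t [] hInR1 ht1, getD_set_eq base t _ [] htlt]
  rw [PySem.List.pyGetD_natCast]
  rw [getD_set_ne row (c + 1) c _ none (by omega)]
  by_cases h0 : row.getD c none = none
  · rw [if_neg (not_not_intro h0), if_pos h0]
    rw [PySem.List.pySetD_natCast]
    rw [pySetD_t _ row_copy t _ hInR1 ht1, List.set_set]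
    rw [PySem.List.pyGetD_zero_cons, pyGetD_one_cons]
    have hInR2 : PySem.Raise.InRange (base.set t ((row.set (c + 1) (some player)).set c (some player))).length row_copy := by
      simpa using hInR
    have ht2 : (pvNorm (base.set t ((row.set (c + 1) (some player)).set c (some player))).length row_copy).toNat = t := by
      simpa using ht
    rw [pyGetD_t _ row_copy t [] hInR2 ht2, getD_set_eq base t _ [] htlt]
    rw [show ((c : Nat) : Int) + 1 = (((c + 1 : Nat)) : Int) from by push_cast; ring]
    rw [PySem.List.pySetD_natCast]
    rw [show ((row.set (c + 1) (some player)).set c (some player)).set (c + 1) none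
          = row.set c (some player) from by
      rw [List.set_comm (some player) none (by omega : c ≠ c + 1), List.set_set,
        set_eq_self_of_getD row (c + 1) none none hlen hcell]]
    rw [pySetD_t _ row_copy t _ hInR2 ht2, List.set_set]
  · rw [if_pos h0, if_neg h0]

-- the steady state of A's loop: the player sits at column c+1 of row t of base,
-- previous_position is [row_copy, c+1], and the next column to inspect is c
theorem loopA_inv (row_copy col_copy : Int) (player : String)
    (base : List (List (Option String))) (t : Nat) (row : List (Option String))
    (hInR : PySem.Raise.InRange base.length row_copy)
    (ht : (pvNorm base.length row_copy).toNat = t) :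
    ∀ c : Nat, ((c : Int) + 1 ≤ col_copy) → (c + 1 < row.length) →
      row.getD (c + 1) none = none →
      mwLoopA row_copy col_copy player (PySem.List.pyRange (col_copy - (c : Int)) (col_copy + 1) 1)
        (base.set t (row.set (c + 1) (some player))) [row_copy, (c : Int) + 1]
      = base.set t (row.set (scanN row (c + 1)) (some player)) := by
  intro c
  induction c with
  | zero =>
    intro hc hlen hcell
    rw [loopA_step row_copy col_copy player base t row hInR ht 0 hc hlen hcell]
    by_cases h0 : row.getD 0 none = none
    · rw [if_pos h0]
      rw [show col_copy - ((0 : Nat) : Int) + 1 = col_copy + 1 from by push_cast; ring]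
      rw [PySem.List.pyRange_one_eq_nil (le_refl _)]
      simp only [mwLoopA, scanN]
      rw [if_pos h0]
    · rw [if_neg h0]
      simp only [scanN]
      rw [if_neg h0]
  | succ j ih =>
    intro hc hlen hcell
    rw [loopA_step row_copy col_copy player base t row hInR ht (j + 1) hc hlen hcell]
    by_cases h0 : row.getD (j + 1) none = none
    · rw [if_pos h0]
      rw [show col_copy - ((j + 1 : Nat) : Int) + 1 = col_copy - ((j : Nat) : Int) from by
        push_cast; ring]
      rw [show (((j + 1) : Nat) : Int) = ((j : Nat) : Int) + 1 from by push_cast; ring]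
      rw [ih (by push_cast at hc ⊢; omega) (by omega) h0]
      have hs : scanN row (j + 1 + 1) = scanN row (j + 1) := by
        conv_lhs => rw [scanN]
        rw [if_pos h0]
      rw [hs]
    · rw [if_neg h0]
      have hs : scanN row (j + 1 + 1) = j + 1 + 1 := by
        conv_lhs => rw [scanN]
        rw [if_neg h0]
      rw [hs]

-- main agreement theorem outside D_
theorem move_west_eq (new_board : List (List (Option String))) (row_copy : Int) (col_copy : Int)
    (previous_position : List Int) (player : String)
    (hpre : Pre_move_west new_board row_copy col_copy previous_position player)
    (hnd : ¬ D_move_west new_board row_copy col_copy previous_position player) :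
    move_west new_board row_copy col_copy previous_position player
      = move_west_alt new_board row_copy col_copy previous_position player := by
  unfold move_west move_west_alt
  by_cases hcc : col_copy < 1
  · rw [PySem.List.pyRange_one_eq_nil (by omega), if_pos (Or.inl hcc)]
    simp only [mwLoopA]
  · push_neg at hcc
    obtain ⟨hInR, hlenI, hprev⟩ := hpre hcc
    have htlt : (pvNorm new_board.length row_copy).toNat < new_board.length := pvNorm_lt hInR
    set t := (pvNorm new_board.length row_copy).toNat with htdef
    have hrow0 : PySem.List.pyGetD new_board row_copy [] = new_board.getD t [] :=
      pyGetD_t new_board row_copy t [] hInR rfl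
    set row0 := PySem.List.pyGetD new_board row_copy [] with hrow0def
    have hc1cast : (((col_copy - 1).toNat : Nat) : Int) = col_copy - 1 := by omega
    set c1n := (col_copy - 1).toNat with hc1def
    have hc1lt : c1n < row0.length := by omega
    by_cases hcell : PySem.List.pyGetD row0 (col_copy - 1) none = none
    case neg =>
      rw [if_pos (Or.inr hcell)]
      rw [PySem.List.pyRange_one_cons (by omega : (1:Int) < col_copy + 1)]
      simp only [mwLoopA]
      rw [if_pos (by omega : (0:Int) ≤ col_copy - 1)]
      rw [if_pos hcell]
    case pos =>
      obtain ⟨hplen, hInRp0, hInRp1⟩ := hprev hcell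
      have hcellD : row0.getD c1n none = none := by
        have h := hcell
        rw [show col_copy - 1 = ((c1n : Nat) : Int) from hc1cast.symm,
          PySem.List.pyGetD_natCast] at h
        exact h
      set p0 := PySem.List.pyGetD previous_position 0 0 with hp0def
      set p1 := PySem.List.pyGetD previous_position 1 0 with hp1def
      set rowP := PySem.List.pyGetD new_board p0 [] with hrowPdef
      set q0 := (pvNorm new_board.length p0).toNat with hq0def
      set q1 := (pvNorm rowP.length p1).toNat with hq1def
      have hq0lt : q0 < new_board.length := pvNorm_lt hInRp0
      have hq1lt : q1 < rowP.length := pvNorm_lt hInRp1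
      have hrowP : rowP = new_board.getD q0 [] := pyGetD_t new_board p0 q0 [] hInRp0 rfl
      -- B's guard is false
      rw [if_neg (by
        rw [not_or]
        exact ⟨by omega, not_not_intro hcell⟩)]
      simp only []
      rw [pySetD_t rowP p1 q1 none hInRp1 rfl]
      rw [pySetD_t new_board p0 q0 _ hInRp0 rfl]
      -- A's first iteration
      rw [PySem.List.pyRange_one_cons (by omega : (1:Int) < col_copy + 1)]
      simp only [mwLoopA]
      rw [if_pos (by omega : (0:Int) ≤ col_copy - 1)]
      rw [if_neg (not_not_intro hcell)]
      rw [show col_copy - 1 = ((c1n : Nat) : Int) from hc1cast.symm]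
      rw [PySem.List.pySetD_natCast]
      rw [pySetD_t new_board row_copy t _ hInR rfl]
      rw [← hp0def, ← hp1def]
      have hInR1 : PySem.Raise.InRange (new_board.set t (row0.set c1n (some player))).length p0 := by
        simpa using hInRp0
      have ht1 : (pvNorm (new_board.set t (row0.set c1n (some player))).length p0).toNat = q0 := by
        simp only [List.length_set]
        exact hq0def.symm
      rw [pyGetD_t _ p0 q0 [] hInR1 ht1]
      rw [pySetD_t _ p0 q0 _ hInR1 ht1]
      by_cases hq0t : q0 = t
      case neg =>
        -- previous position clears a different row of the board
        have hb1get : (new_board.set t (row0.set c1n (some player))).getD q0 [] = rowP := by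
          rw [getD_set_ne _ t q0 _ [] (fun h => hq0t h.symm), hrowP]
        rw [hb1get]
        rw [pySetD_t rowP p1 q1 none hInRp1 rfl]
        rw [List.set_comm _ _ (fun h => hq0t h.symm)]
        have hbInR : PySem.Raise.InRange (new_board.set q0 (rowP.set q1 none)).length row_copy := by
          simpa using hInR
        have hbt : (pvNorm (new_board.set q0 (rowP.set q1 none)).length row_copy).toNat = t := by
          simp only [List.length_set]
          exact htdef.symm
        have hbrow : (new_board.set q0 (rowP.set q1 none)).getD t [] = row0 := by
          rw [getD_set_ne _ q0 t _ [] hq0t, hrow0]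
        rw [mwScan_eq _ row_copy t hbInR hbt, hbrow]
        rw [pyGetD_t _ row_copy t [] hbInR hbt, hbrow]
        rw [PySem.List.pySetD_natCast]
        rw [pySetD_t _ row_copy t _ hbInR hbt]
        by_cases h1 : col_copy = 1
        · subst h1
          rw [PySem.List.pyRange_one_eq_nil (by omega : (1:Int) + 1 ≤ 1 + 1)]
          simp only [mwLoopA]
          rw [show c1n = 0 from by omega]
          rfl
        · have hc2 : 2 ≤ col_copy := by omega
          obtain ⟨c, hcdef⟩ : ∃ c, c1n = c + 1 := ⟨c1n - 1, by omega⟩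
          rw [show (1:Int) + 1 = col_copy - ((c : Nat) : Int) from by omega]
          rw [hcdef]
          rw [show (((c + 1 : Nat)) : Int) = ((c : Nat) : Int) + 1 from by push_cast; ring]
          exact loopA_inv row_copy col_copy player _ t row0 hbInR hbt c
            (by omega) (by omega) (by rw [← hcdef]; exact hcellD)
      case pos =>
        -- previous position names the played row itself
        rw [hq0t]
        have hrowPr : rowP = row0 := by rw [hrowP, hq0t, hrow0]
        have hb1get : (new_board.set t (row0.set c1n (some player))).getD t []
            = row0.set c1n (some player) := getD_set_eq new_board t _ [] htlt
        rw [hb1get]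
        have hlrow : (row0.set c1n (some player)).length = rowP.length := by
          rw [hrowPr, List.length_set]
        have hInRp1' : PySem.Raise.InRange (row0.set c1n (some player)).length p1 := by
          rw [hlrow]; exact hInRp1
        have htq1' : (pvNorm (row0.set c1n (some player)).length p1).toNat = q1 := by
          rw [hlrow]
          try exact hq1def.symm
        rw [pySetD_t _ p1 q1 none hInRp1' htq1']
        rw [List.set_set]
        by_cases hq1c : q1 = c1n
        case pos =>
          -- ¬ D_ forces a second free square west of the vacated one
          have hD1 : PySem.List.pyIdx? new_board.length p0 = PySem.List.pyIdx? new_board.length row_copy := by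
            rw [pyIdx_norm hInRp0, pyIdx_norm hInR]
            exact congrArg some hq0t
          have hD2 : PySem.List.pyIdx? row0.length p1 = some (col_copy - 1).toNat := by
            have hlen' : rowP.length = row0.length := by rw [hrowPr]
            rw [← hlen', pyIdx_norm hInRp1]
            exact congrArg some hq1c
          have hnd2 : ¬ (col_copy = 1 ∨ row0.getD (col_copy - 2).toNat none ≠ none) := by
            intro hor
            refine hnd ?_
            unfold D_move_west
            exact ⟨hcc, hD1, hD2, hcellD, hor⟩
          push_neg at hnd2
          obtain ⟨hne1, hc2cellD⟩ := hnd2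
          have hcc2 : 2 ≤ col_copy := by omega
          set c2n := (col_copy - 2).toNat with hc2def
          have hc2cast : ((c2n : Nat) : Int) = col_copy - 2 := by omega
          have hc12 : c1n = c2n + 1 := by omega
          -- A's first iteration undoes itself
          rw [hrowPr, hq1c, List.set_set]
          rw [set_eq_self_of_getD row0 c1n none none hc1lt hcellD]
          rw [set_eq_self_of_getD new_board t [] row0 htlt hrow0.symm]
          rw [mwScan_eq new_board row_copy t hInR rfl, ← hrow0]
          rw [pyGetD_t new_board row_copy t [] hInR rfl, ← hrow0]
          rw [PySem.List.pySetD_natCast]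
          rw [pySetD_t new_board row_copy t _ hInR rfl]
          -- A's second iteration
          rw [PySem.List.pyRange_one_cons (by omega : (1:Int) + 1 < col_copy + 1)]
          simp only [mwLoopA]
          rw [show col_copy - ((1:Int) + 1) = ((c2n : Nat) : Int) from by omega]
          rw [if_pos (by omega : (0:Int) ≤ ((c2n : Nat) : Int))]
          rw [pyGetD_t new_board row_copy t [] hInR rfl, ← hrow0]
          rw [PySem.List.pyGetD_natCast]
          rw [if_neg (not_not_intro hc2cellD)]
          rw [PySem.List.pySetD_natCast]
          rw [pySetD_t new_board row_copy t _ hInR rfl]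
          rw [PySem.List.pyGetD_zero_cons, pyGetD_one_cons]
          have hInR2 : PySem.Raise.InRange (new_board.set t (row0.set c2n (some player))).length row_copy := by
            simpa using hInR
          have ht2 : (pvNorm (new_board.set t (row0.set c2n (some player))).length row_copy).toNat = t := by
            simp only [List.length_set]
            exact htdef.symm
          rw [pyGetD_t _ row_copy t [] hInR2 ht2, getD_set_eq new_board t _ [] htlt]
          rw [PySem.List.pySetD_natCast]
          rw [show (row0.set c2n (some player)).set c1n none = row0.set c2n (some player) from by
            rw [List.set_comm (some player) none (by omega : c2n ≠ c1n),
              set_eq_self_of_getD row0 c1n none none hc1lt hcellD]]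
          rw [pySetD_t _ row_copy t _ hInR2 ht2, List.set_set]
          have hsc : scanN row0 c1n = scanN row0 c2n := by
            rw [hc12]
            conv_lhs => rw [scanN]
            rw [if_pos hc2cellD]
          rw [hsc]
          by_cases h2 : col_copy = 2
          · subst h2
            rw [PySem.List.pyRange_one_eq_nil (by omega : (2:Int) + 1 ≤ 1 + 1 + 1)]
            simp only [mwLoopA]
            rw [show c2n = 0 from by omega]
            simp only [scanN]
          · have hcc3 : 3 ≤ col_copy := by omega
            obtain ⟨c, hcdef⟩ : ∃ c, c2n = c + 1 := ⟨c2n - 1, by omega⟩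
            rw [show (1:Int) + 1 + 1 = col_copy - ((c : Nat) : Int) from by omega]
            rw [hcdef]
            rw [show (((c + 1 : Nat)) : Int) = ((c : Nat) : Int) + 1 from by push_cast; ring]
            exact loopA_inv row_copy col_copy player new_board t row0 hInR rfl c
              (by omega) (by omega) (by rw [← hcdef]; exact hc2cellD)
        case neg =>
          -- previous position clears another square of the played row
          rw [List.set_comm (some player) none (fun h => hq1c h.symm)]
          rw [hrowPr]
          rw [show new_board.set t ((row0.set q1 none).set c1n (some player))
                = (new_board.set t (row0.set q1 none)).set t ((row0.set q1 none).set c1n (some player)) from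
            (List.set_set _).symm]
          have hbInR : PySem.Raise.InRange (new_board.set t (row0.set q1 none)).length row_copy := by
            simpa using hInR
          have hbt : (pvNorm (new_board.set t (row0.set q1 none)).length row_copy).toNat = t := by
            simp only [List.length_set]
            exact htdef.symm
          have hbrow : (new_board.set t (row0.set q1 none)).getD t [] = row0.set q1 none :=
            getD_set_eq new_board t _ [] htlt
          rw [mwScan_eq _ row_copy t hbInR hbt, hbrow]
          rw [pyGetD_t _ row_copy t [] hbInR hbt, hbrow]
          rw [PySem.List.pySetD_natCast]
          rw [pySetD_t _ row_copy t _ hbInR hbt]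
          have hq1row : q1 < row0.length := by
            have := hq1lt
            rw [hrowPr] at this
            exact this
          have hbcell : (row0.set q1 none).getD c1n none = none := by
            rw [getD_set_ne row0 q1 c1n none none hq1c, hcellD]
          by_cases h1 : col_copy = 1
          · subst h1
            rw [PySem.List.pyRange_one_eq_nil (by omega : (1:Int) + 1 ≤ 1 + 1)]
            simp only [mwLoopA]
            rw [show c1n = 0 from by omega]
            rfl
          · have hc2 : 2 ≤ col_copy := by omega
            obtain ⟨c, hcdef⟩ : ∃ c, c1n = c + 1 := ⟨c1n - 1, by omega⟩
            rw [show (1:Int) + 1 = col_copy - ((c : Nat) : Int) from by omega]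
            rw [hcdef]
            rw [show (((c + 1 : Nat)) : Int) = ((c : Nat) : Int) + 1 from by push_cast; ring]
            exact loopA_inv row_copy col_copy player _ t (row0.set q1 none) hbInR hbt c
              (by omega) (by simp only [List.length_set]; omega)
              (by rw [← hcdef]; exact hbcell)

-- inside D_ the two results differ: A has dropped the player, B has placed it
theorem move_west_neq (new_board : List (List (Option String))) (row_copy : Int) (col_copy : Int)
    (previous_position : List Int) (player : String)
    (hpre : Pre_move_west new_board row_copy col_copy previous_position player)
    (hd : D_move_west new_board row_copy col_copy previous_position player) :
    move_west new_board row_copy col_copy previous_position player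
      ≠ move_west_alt new_board row_copy col_copy previous_position player := by
  obtain ⟨hcc, hD1, hD2, hcellD0, hor⟩ := hd
  obtain ⟨hInR, hlenI, hprev⟩ := hpre hcc
  have hcell : PySem.List.pyGetD (PySem.List.pyGetD new_board row_copy []) (col_copy - 1) none = none := by
    rw [show col_copy - 1 = ((((col_copy - 1).toNat : Nat)) : Int) from by omega,
      PySem.List.pyGetD_natCast]
    exact hcellD0
  obtain ⟨hplen, hInRp0, hInRp1⟩ := hprev hcell
  unfold move_west move_west_alt
  have htlt : (pvNorm new_board.length row_copy).toNat < new_board.length := pvNorm_lt hInR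
  set t := (pvNorm new_board.length row_copy).toNat with htdef
  have hrow0 : PySem.List.pyGetD new_board row_copy [] = new_board.getD t [] :=
    pyGetD_t new_board row_copy t [] hInR rfl
  set row0 := PySem.List.pyGetD new_board row_copy [] with hrow0def
  have hc1cast : (((col_copy - 1).toNat : Nat) : Int) = col_copy - 1 := by omega
  set c1n := (col_copy - 1).toNat with hc1def
  have hc1lt : c1n < row0.length := by omega
  have hcellD : row0.getD c1n none = none := hcellD0
  set p0 := PySem.List.pyGetD previous_position 0 0 with hp0def
  set p1 := PySem.List.pyGetD previous_position 1 0 with hp1def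
  set rowP := PySem.List.pyGetD new_board p0 [] with hrowPdef
  set q0 := (pvNorm new_board.length p0).toNat with hq0def
  set q1 := (pvNorm rowP.length p1).toNat with hq1def
  have hq0t : q0 = t := by
    have h := hD1
    rw [pyIdx_norm hInRp0, pyIdx_norm hInR] at h
    exact Option.some.inj h
  have hrowP : rowP = new_board.getD q0 [] := pyGetD_t new_board p0 q0 [] hInRp0 rfl
  have hrowPr : rowP = row0 := by rw [hrowP, hq0t, hrow0]
  have hq1c : q1 = c1n := by
    have hlen' : rowP.length = row0.length := by rw [hrowPr]
    have h := hD2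
    rw [← hlen', pyIdx_norm hInRp1] at h
    exact Option.some.inj h
  -- B's value
  rw [if_neg (by
    rw [not_or]
    exact ⟨by omega, not_not_intro hcell⟩)]
  simp only []
  rw [pySetD_t rowP p1 q1 none hInRp1 rfl]
  rw [pySetD_t new_board p0 q0 _ hInRp0 rfl]
  rw [hq0t, hrowPr, hq1c]
  rw [set_eq_self_of_getD row0 c1n none none hc1lt hcellD]
  rw [set_eq_self_of_getD new_board t [] row0 htlt hrow0.symm]
  rw [mwScan_eq new_board row_copy t hInR rfl, ← hrow0]
  rw [pyGetD_t new_board row_copy t [] hInR rfl, ← hrow0]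
  rw [PySem.List.pySetD_natCast]
  rw [pySetD_t new_board row_copy t _ hInR rfl]
  -- B slides the player to column c1n: one step, then the scan stops
  have hdest : scanN row0 c1n = c1n := by
    by_cases h1 : col_copy = 1
    · rw [show c1n = 0 from by omega]
      rfl
    · have hcc2 : 2 ≤ col_copy := by omega
      have hc2cellD : row0.getD (col_copy - 2).toNat none ≠ none := by
        rcases hor with h1' | h2'
        · exact absurd h1' h1
        · exact h2'
      rw [show c1n = (col_copy - 2).toNat + 1 from by omega]
      conv_lhs => rw [scanN]
      rw [if_neg hc2cellD]
  rw [hdest]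
  -- A's value: the first write is erased again, then the loop stops
  rw [PySem.List.pyRange_one_cons (by omega : (1:Int) < col_copy + 1)]
  simp only [mwLoopA]
  rw [if_pos (by omega : (0:Int) ≤ col_copy - 1)]
  rw [if_neg (not_not_intro hcell)]
  rw [show col_copy - 1 = ((c1n : Nat) : Int) from hc1cast.symm]
  rw [PySem.List.pySetD_natCast]
  rw [pySetD_t new_board row_copy t _ hInR rfl]
  rw [← hp0def, ← hp1def]
  have hInR1 : PySem.Raise.InRange (new_board.set t (row0.set c1n (some player))).length p0 := by
    simpa using hInRp0
  have ht1 : (pvNorm (new_board.set t (row0.set c1n (some player))).length p0).toNat = q0 := by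
    simp only [List.length_set]
    exact hq0def.symm
  rw [pyGetD_t _ p0 q0 [] hInR1 ht1]
  rw [pySetD_t _ p0 q0 _ hInR1 ht1]
  rw [hq0t]
  rw [getD_set_eq new_board t _ [] htlt]
  have hlrow : (row0.set c1n (some player)).length = rowP.length := by
    rw [hrowPr, List.length_set]
  have hInRp1' : PySem.Raise.InRange (row0.set c1n (some player)).length p1 := by
    rw [hlrow]; exact hInRp1
  have htq1' : (pvNorm (row0.set c1n (some player)).length p1).toNat = q1 := by
    rw [hlrow]
    try exact hq1def.symm
  rw [pySetD_t _ p1 q1 none hInRp1' htq1']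
  rw [hq1c, List.set_set, List.set_set]
  rw [set_eq_self_of_getD row0 c1n none none hc1lt hcellD]
  rw [set_eq_self_of_getD new_board t [] row0 htlt hrow0.symm]
  -- the loop now stops: either no square remains, or the next square is occupied
  have hA : mwLoopA row_copy col_copy player (PySem.List.pyRange (1 + 1) (col_copy + 1) 1)
      new_board [row_copy, ((c1n : Nat) : Int)] = new_board := by
    by_cases h1 : col_copy = 1
    · rw [h1]
      rw [PySem.List.pyRange_one_eq_nil (by omega : (1:Int) + 1 ≤ 1 + 1)]
      simp only [mwLoopA]
    · have hcc2 : 2 ≤ col_copy := by omega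
      have h2 : PySem.List.pyGetD row0 (col_copy - 2) none ≠ none := by
        rw [show col_copy - 2 = ((((col_copy - 2).toNat : Nat)) : Int) from by omega,
          PySem.List.pyGetD_natCast]
        rcases hor with h1' | h2'
        · exact absurd h1' h1
        · exact h2'
      rw [PySem.List.pyRange_one_cons (by omega : (1:Int) + 1 < col_copy + 1)]
      simp only [mwLoopA]
      rw [if_pos (by omega : (0:Int) ≤ col_copy - (1 + 1))]
      rw [pyGetD_t new_board row_copy t [] hInR rfl, ← hrow0]
      rw [show col_copy - ((1:Int) + 1) = col_copy - 2 from by ring]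
      rw [if_pos h2]
  rw [hA]
  -- the two boards differ at square (t, c1n)
  intro heq
  have h1 := congrArg (fun b => b.getD t ([] : List (Option String))) heq
  simp only at h1
  rw [← hrow0, getD_set_eq new_board t _ [] htlt] at h1
  have h2 := congrArg (fun r => r.getD c1n (none : Option String)) h1
  simp only at h2
  rw [hcellD, getD_set_eq row0 c1n _ none hc1lt] at h2
  simp at h2

-- ===== VERDICT (by name: the statement is the Claim_ definition above) =====
theorem move_west_spec : Claim_unchanged_move_west := by
  intro new_board row_copy col_copy previous_position player _ hpre
  unfold Spec_move_west
  exact fun h => move_west_eq new_board row_copy col_copy previous_position player hpre h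
theorem move_west_changed : Claim_changed_move_west := by
  unfold Claim_changed_move_west; decide
theorem move_west_tight : Claim_exact_move_west := by
  intro new_board row_copy col_copy previous_position player _ hpre hd
  exact move_west_neq new_board row_copy col_copy previous_position player hpre hd
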